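-- pv_equiv track=rewrite | github.com/svend4/meta | projects/hexglyph/solan_multistep.py | dist_histogram
-- ===== SOURCE A (Python) =====
-- def dist_histogram(dist_mat: list[list[int]]) -> dict[int, int]:
--     """Frequency distribution of off-diagonal Hamming distances."""
--     P = len(dist_mat)
--     hist: dict[int, int] = {}
--     for t1 in range(P):
--         for t2 in range(P):
--             if t1 != t2:
--                 d = dist_mat[t1][t2]
--                 hist[d] = hist.get(d, 0) + 1
--     return hist
-- ===== SOURCE B (Python) =====
-- def dist_histogram(dist_mat: list[list[int]]) -> dict[int, int]:
--     """Frequency distribution of off-diagonal Hamming distances."""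
--     P = len(dist_mat)
--     flat: list[int] = []
--     for i, row in enumerate(dist_mat):
--         flat += [row[j] for j in range(P) if j != i]
--     groups: dict[int, list[int]] = {}
--     for d in flat:
--         groups.setdefault(d, []).append(d)
--     return {d: len(g) for d, g in groups.items()}
-- ===== Notes on version B (the rewrite author's own statement) =====
-- stated objective: alternative
-- what changed: B is staged instead of fused and maintains a different structure: it first flattens the off-diagonal entries row by row, then buckets every occurrence into a per-value list with setdefault/append, and finally derives the histogram by mapping each bucket to its length, whereas A's nested index loops maintain running integer counts updated in place with hist.get(d,0)+1.
import Mathlib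
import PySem

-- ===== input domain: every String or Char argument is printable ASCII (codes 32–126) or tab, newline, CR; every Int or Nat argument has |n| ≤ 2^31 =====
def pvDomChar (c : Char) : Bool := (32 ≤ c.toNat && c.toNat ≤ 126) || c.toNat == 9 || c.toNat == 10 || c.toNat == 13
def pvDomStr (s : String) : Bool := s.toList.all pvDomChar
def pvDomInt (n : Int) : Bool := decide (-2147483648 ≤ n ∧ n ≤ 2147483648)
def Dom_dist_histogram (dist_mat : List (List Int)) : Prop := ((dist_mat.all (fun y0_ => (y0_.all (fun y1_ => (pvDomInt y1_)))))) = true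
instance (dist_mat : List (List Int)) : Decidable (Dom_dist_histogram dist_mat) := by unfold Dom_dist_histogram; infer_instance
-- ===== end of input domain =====

-- B stages the computation (flatten off-diagonal entries, bucket occurrences into
-- per-value lists, map buckets to their lengths) instead of A's fused nested loops
-- maintaining running counts (objective: alternative).

-- ===== PORT A =====
def dist_histogram (dist_mat : List (List Int)) : List (Int × Int) :=
  let P : Int := PySem.List.len dist_mat
  let hist : PySem.Dict Int Int :=
    (PySem.List.pyRange 0 P 1).foldl (fun hist t1 =>
      (PySem.List.pyRange 0 P 1).foldl (fun hist t2 =>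
        if t1 ≠ t2 then
          let d := PySem.List.pyGetD (PySem.List.pyGetD dist_mat t1 []) t2 0
          hist.insert d (hist.getD d 0 + 1)
        else hist) hist) PySem.Dict.empty
  hist.items

-- ===== PORT B =====
def dist_histogram_alt (dist_mat : List (List Int)) : List (Int × Int) :=
  let P : Int := PySem.List.len dist_mat
  let flat : List Int :=
    (PySem.List.enumerate dist_mat).foldl (fun acc p =>
      acc ++ ((PySem.List.pyRange 0 P 1).filter (fun j => decide (j ≠ p.1))).map
        (fun j => PySem.List.pyGetD p.2 j 0)) []
  let groups : PySem.Dict Int (List Int) :=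
    flat.foldl (fun g d => g.modify d [] (fun ys => ys ++ [d])) PySem.Dict.empty
  (groups.items.foldl (fun h p => h.insert p.1 (PySem.List.len p.2)) PySem.Dict.empty).items

-- ===== PRECONDITION & SPEC =====
-- Pre_ excludes exactly the jagged matrices on which A raises IndexError: every
-- off-diagonal access dist_mat[k][j] (j < len(dist_mat), j ≠ k) must be in range.
def Pre_dist_histogram (dist_mat : List (List Int)) : Prop :=
  ∀ (k : Nat) (hk : k < dist_mat.length),
    ∀ (j : Nat), j < dist_mat.length → j ≠ k → j < (dist_mat[k]'hk).length
instance (dist_mat : List (List Int)) : Decidable (Pre_dist_histogram dist_mat) := by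
  unfold Pre_dist_histogram; infer_instance

def pvWitness_dist_histogram : List (List Int) := [[0, 2], [2, 0]]

def Spec_dist_histogram (dist_mat : List (List Int)) (out : List (Int × Int)) : Prop := out = dist_histogram_alt dist_mat
instance (dist_mat : List (List Int)) (out : List (Int × Int)) : Decidable (Spec_dist_histogram dist_mat out) := by unfold Spec_dist_histogram; infer_instance

-- ===== CLAIM (what is proved, stated in full; the proofs are below) =====
def Claim_equal_dist_histogram : Prop := ∀ (dist_mat : List (List Int)), Dom_dist_histogram dist_mat → Pre_dist_histogram dist_mat → Spec_dist_histogram dist_mat (dist_histogram dist_mat)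

-- ===== LEMMAS AND PROOFS =====

-- the flat off-diagonal value list that A's nested loops traverse
def pvFlatA (dist_mat : List (List Int)) : List Int :=
  (PySem.List.pyRange 0 ((dist_mat.length : Int)) 1).flatMap (fun t1 =>
    ((PySem.List.pyRange 0 ((dist_mat.length : Int)) 1).filter (fun t2 => decide (t1 ≠ t2))).map
      (fun t2 => PySem.List.pyGetD (PySem.List.pyGetD dist_mat t1 []) t2 0))

-- the flat off-diagonal value list that B builds row by row
def pvFlatB (dist_mat : List (List Int)) : List Int :=
  (PySem.List.enumerate dist_mat).flatMap (fun p =>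
    ((PySem.List.pyRange 0 ((dist_mat.length : Int)) 1).filter (fun j => decide (j ≠ p.1))).map
      (fun j => PySem.List.pyGetD p.2 j 0))

-- 'for x in l: if p x: acc = g acc (f x)' is a fold over the filtered, mapped list
theorem foldl_ite_skip {α β γ : Type} (g : β → γ → β) (p : α → Prop) [DecidablePred p]
    (f : α → γ) : ∀ (l : List α) (init : β),
    l.foldl (fun acc x => if p x then g acc (f x) else acc) init
      = ((l.filter (fun x => decide (p x))).map f).foldl g init := by
  intro l
  induction l with
  | nil => intro init; rfl
  | cons x xs ih =>
    intro init
    by_cases hx : p x <;> simp [hx, ih]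

-- a fold whose body is itself a fold over (L x) is a fold over the flattened list
theorem foldl_foldl_flatMap {α β γ : Type} (g : β → γ → β) (L : α → List γ) :
    ∀ (l : List α) (init : β),
    l.foldl (fun acc x => (L x).foldl g acc) init = (l.flatMap L).foldl g init := by
  intro l
  induction l with
  | nil => intro init; rfl
  | cons x xs ih => intro init; simp [ih, List.foldl_append]

-- A is the counter of its flat off-diagonal list
theorem A_as_counter (dist_mat : List (List Int)) :
    dist_histogram dist_mat = (PySem.Dict.counter (pvFlatA dist_mat)).items := by
  set N := dist_mat.length with hN
  simp only [dist_histogram, pvFlatA]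
  rw [PySem.List.len_eq]
  have hfn : (fun (hist : PySem.Dict Int Int) (t1 : Int) =>
      (PySem.List.pyRange 0 (N : Int) 1).foldl (fun hist t2 =>
        if t1 ≠ t2 then
          hist.insert (PySem.List.pyGetD (PySem.List.pyGetD dist_mat t1 []) t2 0)
            (hist.getD (PySem.List.pyGetD (PySem.List.pyGetD dist_mat t1 []) t2 0) 0 + 1)
        else hist) hist)
      = (fun (hist : PySem.Dict Int Int) (t1 : Int) =>
          (((PySem.List.pyRange 0 (N : Int) 1).filter (fun t2 => decide (t1 ≠ t2))).map
            (fun t2 => PySem.List.pyGetD (PySem.List.pyGetD dist_mat t1 []) t2 0)).foldl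
            (fun h d => h.insert d (h.getD d 0 + 1)) hist) := by
    funext hist t1
    exact foldl_ite_skip (fun h d => h.insert d (h.getD d 0 + 1)) (fun t2 => t1 ≠ t2)
      (fun t2 => PySem.List.pyGetD (PySem.List.pyGetD dist_mat t1 []) t2 0) _ hist
  rw [hfn, foldl_foldl_flatMap, PySem.Dict.foldl_insert_getD_add_one_eq_counter]

-- B's flat list is A's flat list: same traversal order, with the inequality flipped
theorem flat_eq (dist_mat : List (List Int)) :
    pvFlatB dist_mat = pvFlatA dist_mat := by
  unfold pvFlatB pvFlatA
  rw [PySem.List.enumerate_eq_map_pyRange dist_mat [], List.flatMap_map]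
  apply List.flatMap_congr
  intro t1 _
  simp only []
  congr 1
  apply List.filter_congr
  intro j _
  exact decide_eq_decide.mpr ⟨fun h he => h he.symm, fun h he => h he.symm⟩

-- the bucket-then-measure pipeline of B produces exactly the items of the counter
theorem groups_items_counter (flat : List Int) :
    (((flat.foldl (fun g d => g.modify d [] (fun ys => ys ++ [d])) PySem.Dict.empty).items).foldl
        (fun h p => h.insert p.1 (PySem.List.len p.2)) PySem.Dict.empty).items
      = (PySem.Dict.counter flat).items := by
  set groups : PySem.Dict Int (List Int) :=
    flat.foldl (fun g d => g.modify d [] (fun ys => ys ++ [d])) PySem.Dict.empty with hg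
  have hpair : groups
      = (flat.map (fun d => (d, d))).foldl
          (fun g p => g.modify p.1 [] (fun ys => ys ++ [p.2])) PySem.Dict.empty := by
    rw [hg, List.foldl_map]
  have hkeys : groups.keys = PySem.Set.ofList flat := by
    rw [hg]
    have := PySem.Dict.keys_foldl_modify_key flat (fun d => d) ([] : List Int)
      (fun _ d => fun ys => ys ++ [d]) PySem.Dict.empty
    rw [this, PySem.Dict.keys_empty]
    have hmid : flat.map (fun d => d) = flat := by simp
    rw [hmid, PySem.Set.ofList_eq_foldl]
    rfl
  have hnodup : groups.keys.Nodup := by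
    rw [hkeys]; exact PySem.Set.nodup_ofList flat
  have hgetD : ∀ c : Int, groups.getD c [] = flat.filter (fun d => d == c) := by
    intro c
    rw [hpair, PySem.Dict.getD_foldl_modify_append]
    rw [List.filter_map]
    simp [Function.comp_def]
  have hitems : groups.items
      = (PySem.Set.ofList flat).map (fun k => (k, flat.filter (fun d => d == k))) := by
    rw [PySem.Dict.items_eq_map_keys groups hnodup ([] : List Int), hkeys]
    apply List.map_congr_left
    intro k _
    rw [hgetD k]
  have hfresh : ∀ p ∈ groups.items, (PySem.Dict.empty : PySem.Dict Int Int).contains p.1 = false :=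
    fun p _ => PySem.Dict.contains_empty p.1
  have hmnodup : (groups.items.map Prod.fst).Nodup := hnodup
  rw [PySem.Dict.items_foldl_insert_fresh groups.items Prod.fst
    (fun p => PySem.List.len p.2) PySem.Dict.empty hfresh hmnodup]
  rw [PySem.Dict.items_counter flat, hitems, List.map_map]
  have hemp : (PySem.Dict.empty : PySem.Dict Int Int).items = [] := rfl
  rw [hemp, List.nil_append]
  apply List.map_congr_left
  intro k _
  have hcnt : (flat.filter (fun d => d == k)).length = flat.count k := by
    rw [← List.countP_eq_length_filter]; rfl
  simp [PySem.List.len_eq, hcnt]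

-- B is the counter of its flat list
theorem B_as_counter (dist_mat : List (List Int)) :
    dist_histogram_alt dist_mat = (PySem.Dict.counter (pvFlatB dist_mat)).items := by
  simp only [dist_histogram_alt]
  rw [PySem.List.len_eq]
  rw [PySem.List.foldl_append_eq_flatMap
    (fun p : Int × List Int =>
      ((PySem.List.pyRange 0 ((dist_mat.length : Int)) 1).filter (fun j => decide (j ≠ p.1))).map
        (fun j => PySem.List.pyGetD p.2 j 0))
    (PySem.List.enumerate dist_mat) []]
  rw [List.nil_append]
  exact groups_items_counter (pvFlatB dist_mat)

theorem dist_histogram_eq_alt (dist_mat : List (List Int)) :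
    dist_histogram dist_mat = dist_histogram_alt dist_mat := by
  rw [A_as_counter, B_as_counter, flat_eq]

-- ===== VERDICT (by name: the statement is the Claim_ definition above) =====
theorem dist_histogram_spec : Claim_equal_dist_histogram := by
  intro dist_mat _ _
  unfold Spec_dist_histogram
  exact dist_histogram_eq_alt dist_mat
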